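-- pv_equiv track=rewrite | github.com/michelesr/advent-of-code | 2024/day-7/main.py | compute
-- ===== SOURCE A (Python) =====
-- import itertools
--
-- def compute(equations, operators):
--     anwser = 0
--     for eq in equations:
--         operands = eq[1]
--         n_op = len(eq[1]) - 1
--         found = False
--         combinations = itertools.product(operators, repeat=n_op)
--         while not found and (combination := next(combinations, None)):
--             res = operands[0]
--             for i in range(len(combination)):
--                 match combination[i]:
--                     case "+":
--                         res += operands[i + 1]
--                     case "*":
--                         res *= operands[i + 1]
--                     case "||":
--                         res = int(f"{res}{operands[i + 1]}")
--             if res == eq[0]: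
--                 anwser += res
--                 found = True
--     return anwser
-- ===== SOURCE B (Python) =====
-- def compute(equations, operators):
--     # Breadth-first over the SET of reachable values: one pass over the operands,
--     # keeping every value reachable so far (deduplicated), instead of enumerating
--     # each operator combination separately. Concatenation is only possible for a
--     # nonnegative right operand (A's int(f"{r}{v}") raises otherwise), so it is
--     # guarded by v >= 0.
--     total = 0
--     for target, operands in equations:
--         reach = {operands[0]}
--         for v in operands[1:]:
--             nxt = set()
--             for r in reach:
--                 for op in operators:
--                     if op == "+":
--                         nxt.add(r + v)
--                     elif op == "*":
--                         nxt.add(r * v)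
--                     elif op == "||":
--                         if v >= 0:
--                             nxt.add(int(f"{r}{v}"))
--                     else:
--                         nxt.add(r)
--             reach = nxt
--         if target in reach:
--             total += target
--     return total
-- ===== Notes on version B (the rewrite author's own statement) =====
-- stated objective: faster
-- what changed: B replaces A's per-combination enumeration (itertools.product plus a retry loop that re-evaluates the whole expression for each operator tuple) by a single left-to-right pass maintaining the deduplicated set of reachable intermediate values (concatenation applied only for a nonnegative right operand, the only case where it is possible), so the work per equation is bounded by distinct values rather than by the number of operator tuples.
-- intended difference: On equations whose operand list is exactly the single value equal to the target (when those targets do not sum to zero), A omits them from the sum because its while-condition treats the empty operator tuple as falsy, while B counts them, the intended behaviour since a lone operand trivially produces the target. — e.g. on compute([(5, [5])], ["+"]): A returns 0, B returns 5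
-- outside the precondition, e.g. on compute([(1, [3, -2])], ['+', '||']): A returns 1, B returns 1
import Mathlib
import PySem

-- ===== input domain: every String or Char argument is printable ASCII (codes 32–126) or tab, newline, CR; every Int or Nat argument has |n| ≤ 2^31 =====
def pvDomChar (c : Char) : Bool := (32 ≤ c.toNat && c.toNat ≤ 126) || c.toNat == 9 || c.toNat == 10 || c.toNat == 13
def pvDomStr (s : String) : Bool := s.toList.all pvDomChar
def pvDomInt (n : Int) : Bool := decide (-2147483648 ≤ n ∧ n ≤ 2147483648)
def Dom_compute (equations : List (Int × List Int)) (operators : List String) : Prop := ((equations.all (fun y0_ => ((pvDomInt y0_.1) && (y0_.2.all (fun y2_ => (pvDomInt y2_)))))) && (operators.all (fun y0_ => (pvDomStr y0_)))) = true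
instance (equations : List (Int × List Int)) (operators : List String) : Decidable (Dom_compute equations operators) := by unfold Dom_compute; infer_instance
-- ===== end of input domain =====

-- B replaces A's per-combination enumeration (itertools.product + retry loop) by one left-to-right
-- pass keeping the deduplicated SET of all reachable values; objective: faster (work per equation
-- is bounded by distinct reachable values, not by the number of operator tuples). B guards
-- concatenation by v >= 0 (A's int(f"{res}{v}") raises otherwise), and counts single-operand
-- equations whose operand equals the target, which A accidentally skips (see D_compute below).

-- ===== PORT A =====
-- A's operator dispatch ("+", "*", "||" via int(f"{res}{v}"), any other operator leaves res
-- unchanged). int(...) is PySem.Int.ofStr?; the .getD 0 default is only reached where Python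
-- raises ValueError (negative v), which Pre_compute excludes.
def applyOp (res : Int) (op : String) (v : Int) : Int :=
  if op = "+" then res + v
  else if op = "*" then res * v
  else if op = "||" then (PySem.Int.ofStr? (PySem.Int.toStr res ++ PySem.Int.toStr v)).getD 0
  else res

-- itertools.product(operators, repeat=n), in product order (first position varies slowest)
def prodRep (operators : List String) : Nat → List (List String)
  | 0 => [[]]
  | n + 1 => operators.flatMap (fun o => (prodRep operators n).map (o :: ·))

-- res = operands[0]; for i in range(len(combination)): res = combination[i] applied with operands[i+1]
def evalCombo (operands : List Int) (combo : List String) : Int :=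
  (PySem.List.pyRange 0 (PySem.List.len combo) 1).foldl
    (fun res i => applyOp res (PySem.List.pyGetD combo i "") (PySem.List.pyGetD operands (i + 1) 0))
    (PySem.List.pyGetD operands 0 0)

-- the while loop: stops on an empty (falsy) combination tuple, or on the first match (adding res)
def loopA (target : Int) (operands : List Int) : List (List String) → Int
  | [] => 0
  | c :: rest =>
    if c = [] then 0
    else
      let res := evalCombo operands c
      if res = target then res else loopA target operands rest

def compute (equations : List (Int × List Int)) (operators : List String) : Int :=
  equations.foldl
    (fun anwser eq => anwser + loopA eq.1 eq.2 (prodRep operators (eq.2.length - 1)))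
    0

-- ===== PORT B =====
-- the body of B's innermost loop: nxt.add(...) according to op (concat only for 0 <= v)
def addNext (nxt : PySem.Set Int) (r : Int) (op : String) (v : Int) : PySem.Set Int :=
  if op = "+" then PySem.Set.add nxt (r + v)
  else if op = "*" then PySem.Set.add nxt (r * v)
  else if op = "||" then
    if 0 ≤ v then
      PySem.Set.add nxt ((PySem.Int.ofStr? (PySem.Int.toStr r ++ PySem.Int.toStr v)).getD 0)
    else nxt
  else PySem.Set.add nxt r

-- nxt = set(); for r in reach: for op in operators: ...
def nextSet (operators : List String) (reach : PySem.Set Int) (v : Int) : PySem.Set Int :=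
  reach.foldl
    (fun nxt r => operators.foldl (fun nxt op => addNext nxt r op v) nxt)
    PySem.Set.empty

def compute_alt (equations : List (Int × List Int)) (operators : List String) : Int :=
  equations.foldl
    (fun total eq =>
      let reach :=
        (PySem.List.slice eq.2 (some 1) none).foldl (nextSet operators)
          (PySem.Set.ofList [PySem.List.pyGetD eq.2 0 0])
      if PySem.Set.contains reach eq.1 then total + eq.1 else total)
    0

-- ===== PRECONDITION & SPEC =====
-- Pre_ excludes exactly the inputs on which Python A can raise: an equation with an empty operand
-- list (ValueError from product(repeat=-1)), and — when "||" is an available operator — a negative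
-- operand after the first, on which A's int(f"{res}{v}") raises ValueError as soon as such a
-- concatenation is evaluated (A returns on a few such inputs by matching first; B returns A's
-- value there too — see claim cites — but that raise condition is not closed-form).
def Pre_compute (equations : List (Int × List Int)) (operators : List String) : Prop :=
  ∀ eq ∈ equations, eq.2 ≠ [] ∧ (("||" : String) ∈ operators → ∀ v ∈ eq.2.drop 1, 0 ≤ v)
instance (equations : List (Int × List Int)) (operators : List String) : Decidable (Pre_compute equations operators) := by unfold Pre_compute; infer_instance

def pvWitness_compute : (List (Int × List Int)) × List String := ([(5, [2, 3])], ["+", "*"])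

-- On equations whose operand list is the single value equal to the target (when those targets do
-- not sum to zero), A skips them — its while-condition treats the empty operator tuple as falsy —
-- while B counts them, the intended behaviour since a lone operand trivially produces the target.
def D_compute (equations : List (Int × List Int)) (operators : List String) : Prop :=
  (equations.map (fun eq => if eq.2 = [eq.1] then eq.1 else 0)).sum ≠ 0
instance (equations : List (Int × List Int)) (operators : List String) : Decidable (D_compute equations operators) := by unfold D_compute; infer_instance

def Spec_compute (equations : List (Int × List Int)) (operators : List String) (out : Int) : Prop := ¬ D_compute equations operators → out = compute_alt equations operators
instance (equations : List (Int × List Int)) (operators : List String) (out : Int) : Decidable (Spec_compute equations operators out) := by unfold Spec_compute; infer_instance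

def pvDiffWitness_compute : (List (Int × List Int)) × List String := ([(5, [5])], ["+"])
def pvDiffWitnessOut_compute : Int × Int := (0, 5)

-- ===== CLAIM (what is proved, stated in full; the proofs are below) =====
def Claim_unchanged_compute : Prop := ∀ (equations : List (Int × List Int)) (operators : List String), Dom_compute equations operators → Pre_compute equations operators → Spec_compute equations operators (compute equations operators)
def Claim_changed_compute : Prop := Dom_compute (pvDiffWitness_compute.1) (pvDiffWitness_compute.2) ∧ Pre_compute (pvDiffWitness_compute.1) (pvDiffWitness_compute.2) ∧ D_compute (pvDiffWitness_compute.1) (pvDiffWitness_compute.2) ∧ compute (pvDiffWitness_compute.1) (pvDiffWitness_compute.2) = pvDiffWitnessOut_compute.1 ∧ compute_alt (pvDiffWitness_compute.1) (pvDiffWitness_compute.2) = pvDiffWitnessOut_compute.2 ∧ pvDiffWitnessOut_compute.1 ≠ pvDiffWitnessOut_compute.2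
def Claim_exact_compute : Prop := ∀ (equations : List (Int × List Int)) (operators : List String), Dom_compute equations operators → Pre_compute equations operators → D_compute equations operators → compute equations operators ≠ compute_alt equations operators

-- ===== LEMMAS AND PROOFS =====

-- reference evaluator: apply operators to the operand tail, left to right
def evalZ (r : Int) : List String → List Int → Int
  | [], _ => r
  | _, [] => r
  | op :: cs, v :: vs => evalZ (applyOp r op v) cs vs

-- proof-side reference for B's inner two loops, without the 0 ≤ v guard
def nextF (operators : List String) (reach : PySem.Set Int) (v : Int) : PySem.Set Int :=
  reach.foldl
    (fun nxt r => operators.foldl (fun nxt op => PySem.Set.add nxt (applyOp r op v)) nxt)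
    PySem.Set.empty

theorem addNext_eq (nxt : PySem.Set Int) (r : Int) (op : String) (v : Int)
    (h : op = "||" → 0 ≤ v) :
    addNext nxt r op v = PySem.Set.add nxt (applyOp r op v) := by
  unfold addNext applyOp
  by_cases h1 : op = "+"
  · simp [h1]
  · by_cases h2 : op = "*"
    · simp [h2]
    · by_cases h3 : op = "||"
      · simp [h3, h h3]
      · simp [h1, h2, h3]

theorem nextSet_eq_nextF (operators : List String) (reach : PySem.Set Int) (v : Int)
    (h : ("||" : String) ∈ operators → 0 ≤ v) :
    nextSet operators reach v = nextF operators reach v := by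
  unfold nextSet nextF
  apply PySem.List.foldl_congr_mem
  intro nxt r _
  exact PySem.List.foldl_congr_mem' operators _ _ nxt
    (fun op hop nxt' => addNext_eq nxt' r op v (fun he => h (he ▸ hop)))

theorem mem_prodRep {operators : List String} {n : Nat} {c : List String} :
    c ∈ prodRep operators n ↔ c.length = n ∧ ∀ op ∈ c, op ∈ operators := by
  induction n generalizing c with
  | zero =>
    constructor
    · intro h; simp [prodRep] at h; simp [h]
    · rintro ⟨h, -⟩; simp [prodRep, List.length_eq_zero_iff.mp h]
  | succ n ih =>
    simp only [prodRep, List.mem_flatMap, List.mem_map]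
    constructor
    · rintro ⟨o, ho, c', hc', rfl⟩
      rcases ih.mp hc' with ⟨hlen, hmem⟩
      refine ⟨by simp [hlen], ?_⟩
      intro op hop
      rcases hop with _ | h
      · exact ho
      · exact hmem _ (by assumption)
    · rintro ⟨hlen, hmem⟩
      cases c with
      | nil => simp at hlen
      | cons o c' =>
        refine ⟨o, hmem _ (by simp), c', ih.mpr ⟨by simpa using hlen, fun op h => hmem _ (by simp [h])⟩, rfl⟩

theorem foldRange_evalZ (c : List String) (vs : List Int) (x : Int) (h : c.length ≤ vs.length) :
    (List.range c.length).foldl (fun r k => applyOp r (c.getD k "") (vs.getD k 0)) x = evalZ x c vs := by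
  induction c generalizing vs x with
  | nil => simp [evalZ]
  | cons op cs ih =>
    cases vs with
    | nil => simp at h
    | cons v vs' =>
      rw [List.length_cons, List.range_succ_eq_map]
      simp only [List.foldl_cons, List.foldl_map, List.getD_cons_zero, List.getD_cons_succ]
      exact ih vs' (applyOp x op v) (by simpa using h)

theorem evalCombo_eq (x : Int) (c : List String) (vs : List Int) (h : c.length ≤ vs.length) :
    evalCombo (x :: vs) c = evalZ x c vs := by
  unfold evalCombo
  rw [PySem.List.len_eq, PySem.List.pyRange_one]
  simp only [Int.zero_add, Int.sub_zero, Int.toNat_natCast, List.foldl_map,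
    PySem.List.pyGetD_zero_cons]
  rw [← foldRange_evalZ c vs x h]
  apply PySem.List.foldl_congr_mem
  intro r k hk
  have h2 : PySem.List.pyGetD (x :: vs) ((k : Int) + 1) 0 = vs.getD k 0 := by
    rw [show ((k : Int) + 1) = ((k + 1 : Nat) : Int) by push_cast; ring,
      PySem.List.pyGetD_natCast]
    rfl
  rw [h2]
  simp

theorem loopA_eq (t : Int) (operands : List Int) (L : List (List String))
    (hL : ∀ c ∈ L, c ≠ []) :
    loopA t operands L = if ∃ c ∈ L, evalCombo operands c = t then t else 0 := by
  induction L with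
  | nil => simp [loopA]
  | cons c rest ih =>
    rw [loopA]
    rw [if_neg (hL c (by simp))]
    by_cases hc : evalCombo operands c = t
    · simp [hc]
    · rw [if_neg hc, ih (fun c' h' => hL c' (by simp [h']))]
      congr 1
      simp only [List.mem_cons, eq_iff_iff]
      constructor
      · rintro ⟨c', h1, h2⟩; exact ⟨c', Or.inr h1, h2⟩
      · rintro ⟨c', h1 | h1, h2⟩
        · exact absurd h2 (h1 ▸ hc)
        · exact ⟨c', h1, h2⟩

theorem mem_outer_fold {operators : List String} {v y : Int} (l : List Int) (s : PySem.Set Int) :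
    y ∈ l.foldl
        (fun nxt r => operators.foldl (fun nxt op => PySem.Set.add nxt (applyOp r op v)) nxt) s ↔
      y ∈ s ∨ ∃ r ∈ l, ∃ op ∈ operators, applyOp r op v = y := by
  induction l generalizing s with
  | nil => simp
  | cons r l ih =>
    rw [List.foldl_cons, ih]
    rw [PySem.Set.mem_foldl_add (f := fun op => applyOp r op v)]
    constructor
    · rintro ((h | ⟨op, h1, h2⟩) | ⟨r', h1, op, h2, h3⟩)
      · exact Or.inl h
      · exact Or.inr ⟨r, by simp, op, h1, h2.symm⟩
      · exact Or.inr ⟨r', by simp [h1], op, h2, h3⟩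
    · rintro (h | ⟨r', hmem, op, h2, h3⟩)
      · exact Or.inl (Or.inl h)
      · rcases List.mem_cons.mp hmem with rfl | h1
        · exact Or.inl (Or.inr ⟨op, h2, h3.symm⟩)
        · exact Or.inr ⟨r', h1, op, h2, h3⟩

theorem mem_nextF {operators : List String} {reach : PySem.Set Int} {v y : Int} :
    y ∈ nextF operators reach v ↔ ∃ r ∈ reach, ∃ op ∈ operators, applyOp r op v = y := by
  rw [nextF, mem_outer_fold]
  simp [PySem.Set.empty]

theorem mem_reach_fold {operators : List String} (vs : List Int) (S : PySem.Set Int) (t : Int)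
    (hvs : ("||" : String) ∈ operators → ∀ v ∈ vs, 0 ≤ v) :
    t ∈ vs.foldl (nextSet operators) S ↔
      ∃ r ∈ S, ∃ c, c.length = vs.length ∧ (∀ op ∈ c, op ∈ operators) ∧ evalZ r c vs = t := by
  induction vs generalizing S with
  | nil =>
    simp only [List.foldl_nil, List.length_nil, List.length_eq_zero_iff]
    constructor
    · intro h; exact ⟨t, h, [], rfl, by simp, rfl⟩
    · rintro ⟨r, hr, c, rfl, -, hev⟩
      simpa [evalZ] using hev ▸ hr
  | cons v vs ih =>
    rw [List.foldl_cons,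
      nextSet_eq_nextF operators S v (fun hm => hvs hm v (by simp)),
      ih _ (fun hm v' hv' => hvs hm v' (by simp [hv']))]
    constructor
    · rintro ⟨r', hr', c', hlen, hmem, hev⟩
      rcases mem_nextF.mp hr' with ⟨r, hr, op, hop, rfl⟩
      exact ⟨r, hr, op :: c', by simp [hlen], by
        intro o ho; rcases ho with _ | h
        · exact hop
        · exact hmem _ (by assumption), hev⟩
    · rintro ⟨r, hr, c, hlen, hmem, hev⟩
      cases c with
      | nil => simp at hlen
      | cons op c' =>
        refine ⟨applyOp r op v, mem_nextF.mpr ⟨r, hr, op, hmem _ (by simp), rfl⟩,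
          c', by simpa using hlen, fun o ho => hmem _ (by simp [ho]), hev⟩

theorem contrib_eq (operators : List String) (t : Int) (operands : List Int)
    (hne : operands ≠ [])
    (hneg : ("||" : String) ∈ operators → ∀ v ∈ operands.drop 1, 0 ≤ v) :
    (if PySem.Set.contains
          ((PySem.List.slice operands (some 1) none).foldl (nextSet operators)
            (PySem.Set.ofList [PySem.List.pyGetD operands 0 0])) t = true
      then t else 0) =
      loopA t operands (prodRep operators (operands.length - 1)) +
        (if operands = [t] then t else 0) := by
  cases operands with
  | nil => exact absurd rfl hne
  | cons x vs =>
    rw [PySem.List.slice_from_one, PySem.List.pyGetD_zero_cons, List.tail_cons]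
    cases vs with
    | nil =>
      rw [show prodRep operators ([x].length - 1) = [[]] from rfl, loopA, if_pos rfl]
      simp only [List.foldl_nil, zero_add]
      have : PySem.Set.contains (PySem.Set.ofList [x]) t = true ↔ x = t := by
        rw [PySem.Set.contains_iff, PySem.Set.mem_ofList]
        simp [eq_comm]
      by_cases hx : x = t
      · rw [if_pos (this.mpr hx), if_pos (by simp [hx])]
      · rw [if_neg (fun h => hx (this.mp h)), if_neg (by simp; exact hx)]
    | cons v vs' =>
      rw [show (if (x :: v :: vs') = [t] then t else 0) = 0 from if_neg (by simp), add_zero]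
      have hlen : (x :: v :: vs').length - 1 = (v :: vs').length := rfl
      rw [hlen, loopA_eq t _ _ (by
        intro c hc
        have := (mem_prodRep.mp hc).1
        intro h; rw [h] at this; simp at this)]
      have hiff : PySem.Set.contains
          ((v :: vs').foldl (nextSet operators) (PySem.Set.ofList [x])) t = true ↔
          ∃ c ∈ prodRep operators (v :: vs').length, evalCombo (x :: v :: vs') c = t := by
        rw [PySem.Set.contains_iff,
          mem_reach_fold (v :: vs') _ t (fun hm => by simpa using hneg hm)]
        constructor
        · rintro ⟨r, hr, c, hlen', hmem, hev⟩
          rw [PySem.Set.mem_ofList, List.mem_singleton] at hr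
          subst hr
          exact ⟨c, mem_prodRep.mpr ⟨hlen', hmem⟩,
            by rw [evalCombo_eq _ _ _ (le_of_eq hlen')]; exact hev⟩
        · rintro ⟨c, hc, hev⟩
          rcases mem_prodRep.mp hc with ⟨hlen', hmem⟩
          exact ⟨x, by simp [PySem.Set.mem_ofList], c, hlen', hmem,
            by rw [← evalCombo_eq _ _ _ (le_of_eq hlen')]; exact hev⟩
      by_cases hcond : ∃ c ∈ prodRep operators (v :: vs').length, evalCombo (x :: v :: vs') c = t
      · rw [if_pos (hiff.mpr hcond), if_pos hcond]
      · rw [if_neg (by simp only [hiff]; exact hcond), if_neg hcond]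

theorem compute_alt_eq (equations : List (Int × List Int)) (operators : List String)
    (hpre : Pre_compute equations operators) :
    compute_alt equations operators =
      compute equations operators +
        (equations.map (fun eq => if eq.2 = [eq.1] then eq.1 else 0)).sum := by
  unfold compute compute_alt
  rw [PySem.List.foldl_congr_mem equations
    (fun total eq =>
      let reach :=
        (PySem.List.slice eq.2 (some 1) none).foldl (nextSet operators)
          (PySem.Set.ofList [PySem.List.pyGetD eq.2 0 0])
      if PySem.Set.contains reach eq.1 then total + eq.1 else total)
    (fun total eq =>
      total + if PySem.Set.contains
          ((PySem.List.slice eq.2 (some 1) none).foldl (nextSet operators)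
            (PySem.Set.ofList [PySem.List.pyGetD eq.2 0 0])) eq.1 = true
        then eq.1 else 0) 0
    (by intro acc eq _; dsimp only; split_ifs <;> simp)]
  rw [PySem.List.foldl_add, PySem.List.foldl_add]
  rw [List.map_congr_left
    (fun eq heq => contrib_eq operators eq.1 eq.2 (hpre eq heq).1 (hpre eq heq).2)]
  rw [show (fun eq : Int × List Int =>
      loopA eq.1 eq.2 (prodRep operators (eq.2.length - 1)) +
        (if eq.2 = [eq.1] then eq.1 else 0)) = (fun eq : Int × List Int =>
      (fun e : Int × List Int => loopA e.1 e.2 (prodRep operators (e.2.length - 1))) eq +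
        (fun e : Int × List Int => if e.2 = [e.1] then e.1 else 0) eq) from rfl]
  rw [PySem.List.sum_map_add_int]
  ring

-- ===== VERDICT (by name: the statement is the Claim_ definition above) =====
theorem compute_spec : Claim_unchanged_compute := by
  intro equations operators _ hpre hD
  have h := compute_alt_eq equations operators hpre
  unfold D_compute at hD
  omega

theorem compute_changed : Claim_changed_compute := by
  unfold Claim_changed_compute; decide

theorem compute_tight : Claim_exact_compute := by
  intro equations operators _ hpre hD
  have h := compute_alt_eq equations operators hpre
  unfold D_compute at hD
  omega
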